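-- pv_equiv track=rewrite | github.com/taoaustin/aoc | 2023/18/main.py | read_instructions_shoelace
-- ===== SOURCE A (Python) =====
-- from typing import Dict, List, Tuple
--
-- def read_instructions_shoelace(input: List[Tuple[str, int]]):
--     cur = (0, 0)
--     cur_coord = (0, 0)
--     term1 = 0
--     term2 = 0
--     for i in range(len(input) - 1):
--         dir, mag = input[i]
--         next_dir = input[i + 1][0]
--         cur_offset = offset[(dir, next_dir)]
--         step = ddict[dir]
--         prev_coord = cur_coord
--         cur = (cur[0] + step[0] * mag, cur[1] + step[1] * mag)
--         cur_coord = (cur[0] + cur_offset[0], cur[1] + cur_offset[1])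
--         term1 += (prev_coord[0] * cur_coord[1])
--         term2 += (prev_coord[1] * cur_coord[0])
--     return abs(term1 - term2) // 2
--
-- ddict = {"U": (-1, 0), "D": (1, 0), "R": (0, 1), "L": (0, -1)}
--
-- offset: Dict[Tuple[str, str], Tuple[int, int]] = {
--     ("U", "R"): (0, 0),
--     ("U", "L"): (1, 0),
--     ("D", "R"): (0, 1),
--     ("D", "L"): (1, 1),
--     ("R", "U"): (0, 0),
--     ("R", "D"): (0, 1),
--     ("L", "U"): (1, 0),
--     ("L", "D"): (1, 1)
-- }
-- ===== SOURCE B (Python) =====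
-- from typing import Dict, List, Tuple
--
-- ddict = {"U": (-1, 0), "D": (1, 0), "R": (0, 1), "L": (0, -1)}
--
-- offset: Dict[Tuple[str, str], Tuple[int, int]] = {
--     ("U", "R"): (0, 0),
--     ("U", "L"): (1, 0),
--     ("D", "R"): (0, 1),
--     ("D", "L"): (1, 1),
--     ("R", "U"): (0, 0),
--     ("R", "D"): (0, 1),
--     ("L", "U"): (1, 0),
--     ("L", "D"): (1, 1)
-- }
--
-- def read_instructions_shoelace(input: List[Tuple[str, int]]):
--     # pass 1: build the adjusted corner coordinates
--     pts = [(0, 0)]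
--     cur = (0, 0)
--     for i in range(len(input) - 1):
--         dir, mag = input[i]
--         next_dir = input[i + 1][0]
--         o = offset[(dir, next_dir)]
--         s = ddict[dir]
--         cur = (cur[0] + s[0] * mag, cur[1] + s[1] * mag)
--         pts.append((cur[0] + o[0], cur[1] + o[1]))
--     # pass 2: single running cross-product sum over consecutive vertices
--     area = 0
--     for (x0, y0), (x1, y1) in zip(pts, pts[1:]):
--         area += x0 * y1 - y0 * x1
--     return abs(area) // 2
-- ===== Notes on version B (the rewrite author's own statement) =====
-- stated objective: alternative
-- what changed: B first builds the list of adjusted corner coordinates in one pass and then computes the area as a single running cross-product sum over consecutive vertices, instead of A's interleaved term1/term2 accumulation inside the coordinate loop.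
import Mathlib
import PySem

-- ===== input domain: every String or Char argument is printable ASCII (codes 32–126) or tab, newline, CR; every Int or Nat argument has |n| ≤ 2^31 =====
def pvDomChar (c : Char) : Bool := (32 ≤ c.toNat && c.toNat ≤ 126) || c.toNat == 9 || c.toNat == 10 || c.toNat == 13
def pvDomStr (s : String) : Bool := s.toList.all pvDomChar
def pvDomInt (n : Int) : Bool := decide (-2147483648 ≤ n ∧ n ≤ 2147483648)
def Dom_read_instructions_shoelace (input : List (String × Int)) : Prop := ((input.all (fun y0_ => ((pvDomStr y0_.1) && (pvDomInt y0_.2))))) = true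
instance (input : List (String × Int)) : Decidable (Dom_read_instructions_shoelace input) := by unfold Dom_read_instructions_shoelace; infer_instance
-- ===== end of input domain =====

-- B builds the adjusted corner list first and then takes one running cross-product sum;
-- A interleaves term1/term2 accumulation inside the coordinate loop (objective: alternative decomposition).

-- ddict[dir]  (none = KeyError)
def pvDdict (d : String) : Option (Int × Int) :=
  if d = "U" then some (-1, 0)
  else if d = "D" then some (1, 0)
  else if d = "R" then some (0, 1)
  else if d = "L" then some (0, -1)
  else none

-- offset[(dir, next_dir)]  (none = KeyError)
def pvOffset (p : String × String) : Option (Int × Int) :=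
  if p = ("U", "R") then some (0, 0)
  else if p = ("U", "L") then some (1, 0)
  else if p = ("D", "R") then some (0, 1)
  else if p = ("D", "L") then some (1, 1)
  else if p = ("R", "U") then some (0, 0)
  else if p = ("R", "D") then some (0, 1)
  else if p = ("L", "U") then some (1, 0)
  else if p = ("L", "D") then some (1, 1)
  else none

-- ===== PORT A =====
-- the loop 'for i in range(len(input)-1)' over input[i], input[i+1], carried state
-- (cur, cur_coord, term1, term2); the (0,0) fallback on a failed lookup is the KeyError
-- case, excluded by Pre_.
def pvGoA : List (String × Int) → (Int × Int) → (Int × Int) → Int → Int → Int × Int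
  | (dir, mag) :: rest@((next_dir, _) :: _), cur, cur_coord, term1, term2 =>
    match pvOffset (dir, next_dir), pvDdict dir with
    | some cur_offset, some step =>
      let cur' := (cur.1 + step.1 * mag, cur.2 + step.2 * mag)
      let cur_coord' := (cur'.1 + cur_offset.1, cur'.2 + cur_offset.2)
      pvGoA rest cur' cur_coord' (term1 + cur_coord.1 * cur_coord'.2)
        (term2 + cur_coord.2 * cur_coord'.1)
    | _, _ => (0, 0)
  | _, _, _, term1, term2 => (term1, term2)

def read_instructions_shoelace (input : List (String × Int)) : Int :=
  PySem.Int.floordiv |(pvGoA input (0, 0) (0, 0) 0 0).1 - (pvGoA input (0, 0) (0, 0) 0 0).2| 2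

-- ===== PORT B =====
-- pass 1: the adjusted corner coordinates (same loop bound: stops when fewer than two remain)
def pvBuild : List (String × Int) → (Int × Int) → List (Int × Int)
  | (dir, mag) :: rest@((next_dir, _) :: _), cur =>
    match pvOffset (dir, next_dir), pvDdict dir with
    | some o, some s =>
      let cur' := (cur.1 + s.1 * mag, cur.2 + s.2 * mag)
      (cur'.1 + o.1, cur'.2 + o.2) :: pvBuild rest cur'
    | _, _ => []
  | _, _ => []

-- pass 2: running cross-product sum over zip(pts, pts[1:])
def pvArea (pts : List (Int × Int)) : Int :=
  (pts.zip pts.tail).foldl (fun a pq => a + (pq.1.1 * pq.2.2 - pq.1.2 * pq.2.1)) 0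

def read_instructions_shoelace_alt (input : List (String × Int)) : Int :=
  PySem.Int.floordiv |pvArea ((0, 0) :: pvBuild input (0, 0))| 2

-- ===== PRECONDITION & SPEC =====
-- Pre_ excludes exactly the inputs where A raises KeyError: some consecutive pair of
-- directions is not a key of offset (this also forces each used dir to be a key of ddict).
def Pre_read_instructions_shoelace (input : List (String × Int)) : Prop :=
  ∀ p ∈ input.zip input.tail,
    (p.1.1, p.2.1) ∈ [("U","R"), ("U","L"), ("D","R"), ("D","L"),
                      ("R","U"), ("R","D"), ("L","U"), ("L","D")]
instance (input : List (String × Int)) : Decidable (Pre_read_instructions_shoelace input) := by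
  unfold Pre_read_instructions_shoelace; infer_instance

def pvWitness_read_instructions_shoelace : (List (String × Int)) :=
  [("R", 2), ("D", 2), ("L", 2), ("U", 2)]

def Spec_read_instructions_shoelace (input : List (String × Int)) (out : Int) : Prop := out = read_instructions_shoelace_alt input
instance (input : List (String × Int)) (out : Int) : Decidable (Spec_read_instructions_shoelace input out) := by unfold Spec_read_instructions_shoelace; infer_instance

-- ===== CLAIM (what is proved, stated in full; the proofs are below) =====
def Claim_equal_read_instructions_shoelace : Prop := ∀ (input : List (String × Int)), Dom_read_instructions_shoelace input → Pre_read_instructions_shoelace input → Spec_read_instructions_shoelace input (read_instructions_shoelace input)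

-- ===== LEMMAS AND PROOFS =====

-- right-recursive cross sum over consecutive vertices (proof helper)
def pvCross : List (Int × Int) → Int
  | (x0, y0) :: rest@((x1, y1) :: _) => (x0 * y1 - y0 * x1) + pvCross rest
  | _ => 0

theorem pv_foldl_cross (pts : List (Int × Int)) :
    pvArea pts = pvCross pts := by
  unfold pvArea
  suffices h : ∀ (pts : List (Int × Int)) (a : Int),
      (pts.zip pts.tail).foldl (fun a pq => a + (pq.1.1 * pq.2.2 - pq.1.2 * pq.2.1)) a
        = a + pvCross pts by
    simpa using h pts 0
  intro pts
  induction pts with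
  | nil => intro a; simp [pvCross]
  | cons p rest ih =>
    intro a
    cases rest with
    | nil => simp [pvCross]
    | cons q rest' =>
      simp only [List.tail_cons, List.zip_cons_cons, List.foldl_cons]
      have := ih (a + (p.1 * q.2 - p.2 * q.1))
      simp only [List.tail_cons] at this
      rw [this, pvCross]
      ring

theorem pvCross_cons_cons (p q : Int × Int) (r : List (Int × Int)) :
    pvCross (p :: q :: r) = (p.1 * q.2 - p.2 * q.1) + pvCross (q :: r) := by
  obtain ⟨x0, y0⟩ := p; obtain ⟨x1, y1⟩ := q; simp [pvCross]

theorem pv_lookup_some {d nd : String}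
    (h : (d, nd) ∈ [("U","R"), ("U","L"), ("D","R"), ("D","L"),
                    ("R","U"), ("R","D"), ("L","U"), ("L","D")]) :
    (pvOffset (d, nd)).isSome ∧ (pvDdict d).isSome := by
  simp only [List.mem_cons, List.not_mem_nil, or_false, Prod.mk.injEq] at h
  rcases h with ⟨h1, h2⟩ | ⟨h1, h2⟩ | ⟨h1, h2⟩ | ⟨h1, h2⟩ | ⟨h1, h2⟩ | ⟨h1, h2⟩ | ⟨h1, h2⟩ | ⟨h1, h2⟩ <;>
    subst h1 <;> subst h2 <;> decide

theorem pv_goA_cross :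
    ∀ (l : List (String × Int)) (cur cur_coord : Int × Int) (t1 t2 : Int),
      Pre_read_instructions_shoelace l →
      (pvGoA l cur cur_coord t1 t2).1 - (pvGoA l cur cur_coord t1 t2).2
        = (t1 - t2) + pvCross (cur_coord :: pvBuild l cur) := by
  intro l
  induction l with
  | nil => intro cur cc t1 t2 _; simp [pvGoA, pvBuild, pvCross]
  | cons hd rest ih =>
    intro cur cc t1 t2 hpre
    obtain ⟨dir, mag⟩ := hd
    cases rest with
    | nil => simp [pvGoA, pvBuild, pvCross]
    | cons hd2 rest2 =>
      obtain ⟨next_dir, m2⟩ := hd2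
      have hmem : ((dir, mag), (next_dir, m2)) ∈
          ((dir, mag) :: (next_dir, m2) :: rest2).zip ((next_dir, m2) :: rest2) := by
        simp
      have hok := hpre _ hmem
      obtain ⟨ho, hd'⟩ := pv_lookup_some hok
      obtain ⟨o, ho⟩ := Option.isSome_iff_exists.mp ho
      obtain ⟨s, hs⟩ := Option.isSome_iff_exists.mp hd'
      have hpre' : Pre_read_instructions_shoelace ((next_dir, m2) :: rest2) := by
        intro p hp
        exact hpre p (by simp only [List.tail_cons, List.zip_cons_cons]; exact List.mem_cons_of_mem _ hp)
      simp only [pvGoA, pvBuild, ho, hs]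
      rw [ih _ _ _ _ hpre']
      rw [pvCross_cons_cons]
      ring

-- ===== VERDICT (by name: the statement is the Claim_ definition above) =====
theorem read_instructions_shoelace_spec : Claim_equal_read_instructions_shoelace := by
  intro input _ hpre
  unfold Spec_read_instructions_shoelace read_instructions_shoelace read_instructions_shoelace_alt
  rw [pv_foldl_cross]
  have h := pv_goA_cross input (0, 0) (0, 0) 0 0 hpre
  rw [h]
  ring_nf
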